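-- pv_equiv track=rewrite | github.com/SherifEldeeb/agentskills | skills/cybersecurity/detection/scripts/detection_utils.py | _identify_ransomware_pattern
-- ===== SOURCE A (Python) =====
-- from typing import Dict, List, Optional, Any, Tuple
--
-- def _identify_ransomware_pattern(encrypted_files: List[str]) -> str:
--     """Identify ransomware family by extension pattern."""
--     if not encrypted_files:
--         return 'unknown'
--
--     extensions = set(f.split('.')[-1] for f in encrypted_files if '.' in f)
--
--     patterns = {
--         'locky': ['locky', 'zepto', 'odin'],
--         'cerber': ['cerber', 'cerber2', 'cerber3'],
--         'wannacry': ['wncry', 'wcry', 'wncryt'],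
--         'ryuk': ['ryk', 'ryuk'],
--         'lockbit': ['lockbit', 'abcd']
--     }
--
--     for family, exts in patterns.items():
--         if any(ext in extensions for ext in exts):
--             return family
--
--     return 'generic_encryption'
-- ===== SOURCE B (Python) =====
-- def _identify_ransomware_pattern(encrypted_files):
--     """Identify ransomware family by extension pattern (inverted-index, single pass)."""
--     if not encrypted_files:
--         return 'unknown'
--
--     families = ['locky', 'cerber', 'wannacry', 'ryuk', 'lockbit']
--     ext_lists = [
--         ['locky', 'zepto', 'odin'],
--         ['cerber', 'cerber2', 'cerber3'],
--         ['wncry', 'wcry', 'wncryt'],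
--         ['ryk', 'ryuk'],
--         ['lockbit', 'abcd'],
--     ]
--     index = {}
--     for i, exts in enumerate(ext_lists):
--         for e in exts:
--             index[e] = i
--
--     best = len(families)
--     for f in encrypted_files:
--         if '.' in f:
--             i = index.get(f.split('.')[-1])
--             if i is not None and i < best:
--                 best = i
--
--     return families[best] if best < len(families) else 'generic_encryption'
-- ===== Notes on version B (the rewrite author's own statement) =====
-- stated objective: alternative
-- what changed: B inverts A's pattern table into an extension->family-priority index and makes a single pass over the files tracking the minimum matched priority, instead of A's building an extension set and then scanning it family by family.
import Mathlib
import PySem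

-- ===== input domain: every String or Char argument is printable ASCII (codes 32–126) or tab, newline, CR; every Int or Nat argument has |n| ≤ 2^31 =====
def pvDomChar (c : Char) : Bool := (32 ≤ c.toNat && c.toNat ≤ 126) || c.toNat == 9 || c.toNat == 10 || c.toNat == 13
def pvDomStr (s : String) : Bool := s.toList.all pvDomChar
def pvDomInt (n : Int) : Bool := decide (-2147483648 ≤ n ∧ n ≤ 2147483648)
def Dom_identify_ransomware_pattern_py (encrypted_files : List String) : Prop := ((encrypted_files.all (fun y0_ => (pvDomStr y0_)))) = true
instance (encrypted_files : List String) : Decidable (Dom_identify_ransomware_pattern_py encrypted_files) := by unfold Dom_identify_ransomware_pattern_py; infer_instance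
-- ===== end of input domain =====

-- B replaces A's family-by-family scan over the whole extension set with an inverted index
-- (extension → family priority) and a single pass over the files tracking the best priority
-- (objective: alternative decomposition, same observable behaviour).

-- ===== PORT A =====

-- f.split('.')[-1]: '.' ≠ '' so split? is always some, and split never returns an
-- empty list, so pyGet? (-1) is always some — the getD defaults are unreachable.
def pvExt (f : String) : String :=
  (PySem.List.pyGet? ((PySem.Str.split? f ".").getD []) (-1)).getD ""

def pvPatterns : List (String × List String) :=
  [("locky", ["locky", "zepto", "odin"]),
   ("cerber", ["cerber", "cerber2", "cerber3"]),
   ("wannacry", ["wncry", "wcry", "wncryt"]),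
   ("ryuk", ["ryk", "ryuk"]),
   ("lockbit", ["lockbit", "abcd"])]

def identify_ransomware_pattern_py (encrypted_files : List String) : String :=
  if encrypted_files = [] then "unknown"
  else
    let extensions : PySem.Set String :=
      PySem.Set.ofList
        ((encrypted_files.filter (fun f => PySem.Str.isIn "." f)).map (fun f => pvExt f))
    -- 'for family, exts in patterns.items(): if any(...): return family'
    match pvPatterns.find? (fun p => p.2.any (fun e => PySem.Set.contains extensions e)) with
    | some p => p.1
    | none => "generic_encryption"

-- ===== PORT B =====

def pvFamilies : List String := ["locky", "cerber", "wannacry", "ryuk", "lockbit"]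

def pvExtLists : List (List String) :=
  [["locky", "zepto", "odin"],
   ["cerber", "cerber2", "cerber3"],
   ["wncry", "wcry", "wncryt"],
   ["ryk", "ryuk"],
   ["lockbit", "abcd"]]

-- the inverted index: extension → family priority (dict-enumeration order of A's patterns)
def pvExtIndex : PySem.Dict String Int :=
  (PySem.List.enumerate pvExtLists 0).foldl
    (fun d p => p.2.foldl (fun d e => PySem.Dict.insert d e p.1) d) PySem.Dict.empty

def identify_ransomware_pattern_py_alt (encrypted_files : List String) : String :=
  if encrypted_files = [] then "unknown"
  else
    let best : Int := encrypted_files.foldl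
      (fun best f =>
        if PySem.Str.isIn "." f then
          match PySem.Dict.get? pvExtIndex (pvExt f) with
          | some i => if i < best then i else best
          | none => best
        else best) 5
    if best < 5 then PySem.List.pyGetD pvFamilies best "" else "generic_encryption"

-- ===== PRECONDITION & SPEC =====
def Spec_identify_ransomware_pattern_py (encrypted_files : List String) (out : String) : Prop := out = identify_ransomware_pattern_py_alt encrypted_files
instance (encrypted_files : List String) (out : String) : Decidable (Spec_identify_ransomware_pattern_py encrypted_files out) := by unfold Spec_identify_ransomware_pattern_py; infer_instance

-- ===== CLAIM (what is proved, stated in full; the proofs are below) =====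
def Claim_equal_identify_ransomware_pattern_py : Prop := ∀ (encrypted_files : List String), Dom_identify_ransomware_pattern_py encrypted_files → Spec_identify_ransomware_pattern_py encrypted_files (identify_ransomware_pattern_py encrypted_files)

-- ===== LEMMAS AND PROOFS =====

-- the priority of a single file: the index of its extension's family, 5 when no match
def pvSc (f : String) : Int :=
  if PySem.Str.isIn "." f then (PySem.Dict.get? pvExtIndex (pvExt f)).getD 5 else 5

-- the chain form of the inverted index
def pvIdx (e : String) : Int :=
  if e ∈ pvExtLists[0]! then 0 else if e ∈ pvExtLists[1]! then 1
  else if e ∈ pvExtLists[2]! then 2 else if e ∈ pvExtLists[3]! then 3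
  else if e ∈ pvExtLists[4]! then 4 else 5

lemma pvExtIndex_get? (e : String) : PySem.Dict.get? pvExtIndex e =
    if e ∈ pvExtLists[0]! then some 0 else if e ∈ pvExtLists[1]! then some 1
    else if e ∈ pvExtLists[2]! then some 2 else if e ∈ pvExtLists[3]! then some 3
    else if e ∈ pvExtLists[4]! then some 4 else none := by
  have hitems : pvExtIndex.items = [("locky",(0:Int)),("zepto",0),("odin",0),("cerber",1),("cerber2",1),
      ("cerber3",1),("wncry",2),("wcry",2),("wncryt",2),("ryk",3),("ryuk",3),("lockbit",4),
      ("abcd",4)] := by decide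
  by_cases h1 : "locky" = e; · subst h1; decide
  by_cases h2 : "zepto" = e; · subst h2; decide
  by_cases h3 : "odin" = e; · subst h3; decide
  by_cases h4 : "cerber" = e; · subst h4; decide
  by_cases h5 : "cerber2" = e; · subst h5; decide
  by_cases h6 : "cerber3" = e; · subst h6; decide
  by_cases h7 : "wncry" = e; · subst h7; decide
  by_cases h8 : "wcry" = e; · subst h8; decide
  by_cases h9 : "wncryt" = e; · subst h9; decide
  by_cases h10 : "ryk" = e; · subst h10; decide
  by_cases h11 : "ryuk" = e; · subst h11; decide
  by_cases h12 : "lockbit" = e; · subst h12; decide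
  by_cases h13 : "abcd" = e; · subst h13; decide
  have b1 : ("locky" == e) = false := beq_eq_false_iff_ne.mpr h1
  have b2 : ("zepto" == e) = false := beq_eq_false_iff_ne.mpr h2
  have b3 : ("odin" == e) = false := beq_eq_false_iff_ne.mpr h3
  have b4 : ("cerber" == e) = false := beq_eq_false_iff_ne.mpr h4
  have b5 : ("cerber2" == e) = false := beq_eq_false_iff_ne.mpr h5
  have b6 : ("cerber3" == e) = false := beq_eq_false_iff_ne.mpr h6
  have b7 : ("wncry" == e) = false := beq_eq_false_iff_ne.mpr h7
  have b8 : ("wcry" == e) = false := beq_eq_false_iff_ne.mpr h8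
  have b9 : ("wncryt" == e) = false := beq_eq_false_iff_ne.mpr h9
  have b10 : ("ryk" == e) = false := beq_eq_false_iff_ne.mpr h10
  have b11 : ("ryuk" == e) = false := beq_eq_false_iff_ne.mpr h11
  have b12 : ("lockbit" == e) = false := beq_eq_false_iff_ne.mpr h12
  have b13 : ("abcd" == e) = false := beq_eq_false_iff_ne.mpr h13
  simp [PySem.Dict.get?, hitems, List.find?, pvExtLists, b1, b2, b3, b4, b5, b6, b7, b8, b9, b10, b11, b12, b13, Ne.symm h1, Ne.symm h2, Ne.symm h3, Ne.symm h4, Ne.symm h5, Ne.symm h6, Ne.symm h7, Ne.symm h8, Ne.symm h9, Ne.symm h10, Ne.symm h11, Ne.symm h12, Ne.symm h13]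

lemma pvSc_eq (f : String) :
    pvSc f = if PySem.Str.isIn "." f then pvIdx (pvExt f) else 5 := by
  unfold pvSc pvIdx
  rw [pvExtIndex_get?]
  split_ifs <;> rfl

lemma pvSc_nonneg (f : String) : 0 ≤ pvSc f := by
  rw [pvSc_eq]; unfold pvIdx; split_ifs <;> norm_num

-- a matching extension bounds the priority by its family index
lemma pvSc_le_of_mem (f : String) (k : Nat) (hk : k < 5)
    (hd : PySem.Str.isIn "." f = true) (hm : pvExt f ∈ pvExtLists[k]!) : pvSc f ≤ (k : Int) := by
  rw [pvSc_eq]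
  simp only [hd, if_true]
  unfold pvIdx
  interval_cases k <;> split_ifs <;> simp_all <;> norm_num

-- a priority ≤ k < 5 exhibits a matching family of index ≤ k
lemma pvSc_mem_of_le (f : String) (k : Nat) (hk : k < 5) (h : pvSc f ≤ (k : Int)) :
    PySem.Str.isIn "." f = true ∧ ∃ j : Nat, j ≤ k ∧ pvExt f ∈ pvExtLists[j]! := by
  rw [pvSc_eq] at h
  by_cases hd : PySem.Str.isIn "." f = true
  · refine ⟨hd, ?_⟩
    simp only [hd, if_true] at h
    unfold pvIdx at h
    split_ifs at h with h0 h1 h2 h3 h4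
    · exact ⟨0, by omega, h0⟩
    · exact ⟨1, by omega, h1⟩
    · exact ⟨2, by omega, h2⟩
    · exact ⟨3, by omega, h3⟩
    · exact ⟨4, by omega, h4⟩
    · omega
  · simp only [Bool.not_eq_true] at hd
    rw [hd] at h
    simp at h
    omega

-- B's loop body is a min against the file's priority
lemma pvStep_eq (b : Int) (hb : b ≤ 5) (f : String) :
    (if PySem.Str.isIn "." f then
      match PySem.Dict.get? pvExtIndex (pvExt f) with
      | some i => if i < b then i else b
      | none => b
     else b) = min b (pvSc f) := by
  unfold pvSc
  by_cases hd : PySem.Str.isIn "." f = true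
  · simp only [hd, if_true]
    cases hg : PySem.Dict.get? pvExtIndex (pvExt f) with
    | none => simp only [Option.getD_none]; omega
    | some i => simp only [Option.getD_some]; rw [min_def]; split_ifs <;> omega
  · simp only [Bool.not_eq_true] at hd
    rw [hd]
    simp only [Bool.false_eq_true, if_false, Option.getD]
    omega

-- B's fold is a fold of min over the priorities
lemma pvFold_eq (files : List String) : ∀ (b : Int), b ≤ 5 →
    files.foldl
      (fun best f =>
        if PySem.Str.isIn "." f then
          match PySem.Dict.get? pvExtIndex (pvExt f) with
          | some i => if i < best then i else best
          | none => best
        else best) b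
    = files.foldl (fun m f => min m (pvSc f)) b := by
  induction files with
  | nil => intro b _; rfl
  | cons f fs ih =>
    intro b hb
    simp only [List.foldl_cons]
    rw [pvStep_eq b hb f, ih (min b (pvSc f)) (le_trans (min_le_left _ _) hb)]

lemma pvFoldMin_le_init (files : List String) : ∀ (b : Int),
    files.foldl (fun m f => min m (pvSc f)) b ≤ b := by
  induction files with
  | nil => intro b; simp
  | cons g gs ih => intro b; exact le_trans (ih _) (min_le_left _ _)

lemma pvFoldMin_le (files : List String) : ∀ (b : Int) (f : String), f ∈ files →
    files.foldl (fun m f => min m (pvSc f)) b ≤ pvSc f := by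
  induction files with
  | nil => intro b f h; cases h
  | cons g gs ih =>
    intro b f h
    simp only [List.foldl_cons]
    rcases List.mem_cons.mp h with rfl | h
    · exact le_trans (pvFoldMin_le_init gs _) (min_le_right _ _)
    · exact ih _ f h

lemma pvFoldMin_lb (files : List String) : ∀ (b k : Int), k ≤ b →
    (∀ f ∈ files, k ≤ pvSc f) → k ≤ files.foldl (fun m f => min m (pvSc f)) b := by
  induction files with
  | nil => intro b k hb _; simpa using hb
  | cons g gs ih =>
    intro b k hb hall
    simp only [List.foldl_cons]
    exact ih _ _ (le_min hb (hall g List.mem_cons_self))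
      (fun f hf => hall f (List.mem_cons_of_mem _ hf))

-- 'family k matches': some file has a dot and its extension is in family k's list
def pvC (k : Nat) (files : List String) : Prop :=
  ∃ f ∈ files, PySem.Str.isIn "." f = true ∧ pvExt f ∈ pvExtLists[k]!

-- A's per-family test over the extension set, rephrased over the files
lemma pvCond_iff (files : List String) (L : List String) :
    ((L.any fun e => PySem.Set.contains (PySem.Set.ofList
        ((files.filter (fun f => PySem.Str.isIn "." f)).map (fun f => pvExt f))) e) = true)
      ↔ ∃ f ∈ files, PySem.Str.isIn "." f = true ∧ pvExt f ∈ L := by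
  simp only [List.any_eq_true, PySem.Set.contains_iff, PySem.Set.mem_ofList, List.mem_map,
    List.mem_filter]
  constructor
  · rintro ⟨e, heL, f, ⟨hf, hd⟩, rfl⟩
    exact ⟨f, hf, hd, heL⟩
  · rintro ⟨f, hf, hd, hm⟩
    exact ⟨pvExt f, hm, f, ⟨hf, hd⟩, rfl⟩

-- the minimum priority over the files equals the first matching family index
lemma pvM_eq (files : List String) (k : Nat) (hk : k < 5) (hky : pvC k files)
    (hno : ∀ j : Nat, j < k → ¬ pvC j files) :
    files.foldl (fun m f => min m (pvSc f)) 5 = (k : Int) := by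
  obtain ⟨f, hf, hd, hm⟩ := hky
  apply le_antisymm
  · exact le_trans (pvFoldMin_le files 5 f hf) (pvSc_le_of_mem f k hk hd hm)
  · apply pvFoldMin_lb files 5 (k : Int) (by omega)
    intro g hg
    by_contra hlt
    push Not at hlt
    have hk1 : 0 < k := by
      rcases Nat.eq_zero_or_pos k with rfl | h
      · have := pvSc_nonneg g; omega
      · exact h
    have hle : pvSc g ≤ ((k - 1 : Nat) : Int) := by
      have : ((k - 1 : Nat) : Int) = (k : Int) - 1 := by omega
      omega
    obtain ⟨hdg, j, hj, hmem⟩ := pvSc_mem_of_le g (k - 1) (by omega) hle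
    exact hno j (by omega) ⟨g, hg, hdg, hmem⟩

-- no family matches: the minimum priority is 5
lemma pvM_eq_five (files : List String) (hno : ∀ j : Nat, j < 5 → ¬ pvC j files) :
    files.foldl (fun m f => min m (pvSc f)) 5 = 5 := by
  apply le_antisymm (pvFoldMin_le_init files 5)
  apply pvFoldMin_lb files 5 5 le_rfl
  intro g hg
  by_contra hlt
  push Not at hlt
  have hle : pvSc g ≤ (4 : Nat) := by push_cast; omega
  obtain ⟨hdg, j, hj, hmem⟩ := pvSc_mem_of_le g 4 (by omega) hle
  exact hno j (by omega) ⟨g, hg, hdg, hmem⟩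

-- ===== VERDICT (by name: the statement is the Claim_ definition above) =====
theorem identify_ransomware_pattern_py_spec : Claim_equal_identify_ransomware_pattern_py := by
  intro files _
  unfold Spec_identify_ransomware_pattern_py
  by_cases hnil : files = []
  · subst hnil; rfl
  have hB : identify_ransomware_pattern_py_alt files =
      (if files.foldl (fun m f => min m (pvSc f)) 5 < 5
       then PySem.List.pyGetD pvFamilies (files.foldl (fun m f => min m (pvSc f)) 5) ""
       else "generic_encryption") := by
    simp only [identify_ransomware_pattern_py_alt, if_neg hnil]
    rw [pvFold_eq files 5 le_rfl]
  rw [hB]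
  simp only [identify_ransomware_pattern_py, if_neg hnil, pvPatterns]
  by_cases H0 : pvC 0 files
  · rw [List.find?_cons_of_pos (p := fun q : String × List String => q.2.any fun e => (PySem.Set.ofList (List.map (fun f => pvExt f) (List.filter (fun f => PySem.Str.isIn "." f) files))).contains e) ((pvCond_iff files ["locky", "zepto", "odin"]).mpr H0),
      pvM_eq files 0 (by omega) H0 (by intro j hj; omega)]
    decide
  · rw [List.find?_cons_of_neg (p := fun q : String × List String => q.2.any fun e => (PySem.Set.ofList (List.map (fun f => pvExt f) (List.filter (fun f => PySem.Str.isIn "." f) files))).contains e) (fun h => H0 ((pvCond_iff files ["locky", "zepto", "odin"]).mp h))]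
    by_cases H1 : pvC 1 files
    · rw [List.find?_cons_of_pos (p := fun q : String × List String => q.2.any fun e => (PySem.Set.ofList (List.map (fun f => pvExt f) (List.filter (fun f => PySem.Str.isIn "." f) files))).contains e) ((pvCond_iff files ["cerber", "cerber2", "cerber3"]).mpr H1),
        pvM_eq files 1 (by omega) H1 (by intro j hj; interval_cases j; exacts [H0])]
      decide
    · rw [List.find?_cons_of_neg (p := fun q : String × List String => q.2.any fun e => (PySem.Set.ofList (List.map (fun f => pvExt f) (List.filter (fun f => PySem.Str.isIn "." f) files))).contains e) (fun h => H1 ((pvCond_iff files ["cerber", "cerber2", "cerber3"]).mp h))]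
      by_cases H2 : pvC 2 files
      · rw [List.find?_cons_of_pos (p := fun q : String × List String => q.2.any fun e => (PySem.Set.ofList (List.map (fun f => pvExt f) (List.filter (fun f => PySem.Str.isIn "." f) files))).contains e) ((pvCond_iff files ["wncry", "wcry", "wncryt"]).mpr H2),
          pvM_eq files 2 (by omega) H2 (by intro j hj; interval_cases j; exacts [H0, H1])]
        decide
      · rw [List.find?_cons_of_neg (p := fun q : String × List String => q.2.any fun e => (PySem.Set.ofList (List.map (fun f => pvExt f) (List.filter (fun f => PySem.Str.isIn "." f) files))).contains e) (fun h => H2 ((pvCond_iff files ["wncry", "wcry", "wncryt"]).mp h))]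
        by_cases H3 : pvC 3 files
        · rw [List.find?_cons_of_pos (p := fun q : String × List String => q.2.any fun e => (PySem.Set.ofList (List.map (fun f => pvExt f) (List.filter (fun f => PySem.Str.isIn "." f) files))).contains e) ((pvCond_iff files ["ryk", "ryuk"]).mpr H3),
            pvM_eq files 3 (by omega) H3 (by intro j hj; interval_cases j; exacts [H0, H1, H2])]
          decide
        · rw [List.find?_cons_of_neg (p := fun q : String × List String => q.2.any fun e => (PySem.Set.ofList (List.map (fun f => pvExt f) (List.filter (fun f => PySem.Str.isIn "." f) files))).contains e) (fun h => H3 ((pvCond_iff files ["ryk", "ryuk"]).mp h))]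
          by_cases H4 : pvC 4 files
          · rw [List.find?_cons_of_pos (p := fun q : String × List String => q.2.any fun e => (PySem.Set.ofList (List.map (fun f => pvExt f) (List.filter (fun f => PySem.Str.isIn "." f) files))).contains e) ((pvCond_iff files ["lockbit", "abcd"]).mpr H4),
              pvM_eq files 4 (by omega) H4 (by intro j hj; interval_cases j; exacts [H0, H1, H2, H3])]
            decide
          · rw [List.find?_cons_of_neg (p := fun q : String × List String => q.2.any fun e => (PySem.Set.ofList (List.map (fun f => pvExt f) (List.filter (fun f => PySem.Str.isIn "." f) files))).contains e) (fun h => H4 ((pvCond_iff files ["lockbit", "abcd"]).mp h))]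
            rw [List.find?_nil (p := fun q : String × List String => q.2.any fun e => (PySem.Set.ofList (List.map (fun f => pvExt f) (List.filter (fun f => PySem.Str.isIn "." f) files))).contains e),
              pvM_eq_five files (by intro j hj; interval_cases j; exacts [H0, H1, H2, H3, H4])]
            decide
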